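-- pv_equiv track=rewrite | github.com/mcapala/adcs-certreq-issuer | certreq-proxy/main.py | parse_certreq_output
-- ===== SOURCE A (Python) =====
-- def parse_certreq_output(output):
--     """
--     Parses the output from certreq and returns the status, request ID, and error text.
--     Excludes RequestId lines from error text.
--     """
--     status = 'Unknown'
--     request_id = ''
--     status_text_lines = []
--
--     for line in output.splitlines():
--         stripped_line = line.strip()
--         if 'RequestId:' in stripped_line:
--             if not request_id:
--                 request_id = stripped_line.split('RequestId:')[1].strip().strip('"')
--         elif 'Certificate retrieved' in stripped_line or 'Certificate Issued' in stripped_line or 'Valid' in stripped_line: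
--             status_text_lines.append(stripped_line)
--             status = 'Ready'
--         elif 'Certificate request is pending' in stripped_line or 'The request was submitted to the certification authority' in stripped_line:
--             status_text_lines.append(stripped_line)
--             status = 'Pending'
--         elif 'Request denied' in stripped_line or 'Denied by Policy Module' in stripped_line:
--             status_text_lines.append(stripped_line)
--             status = 'Rejected'
--         elif 'Error' in stripped_line or '0x' in stripped_line:
--             status = 'Errored'
--             status_text_lines.append(stripped_line)
--         else:
--             status_text_lines.append(stripped_line)
--
--     error_text = '\n'.join(status_text_lines).strip()
--     return status, request_id, error_text
-- ===== SOURCE B (Python) =====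
-- def _categorize(s):
--     if 'Certificate retrieved' in s or 'Certificate Issued' in s or 'Valid' in s:
--         return 'Ready'
--     if 'Certificate request is pending' in s or 'The request was submitted to the certification authority' in s:
--         return 'Pending'
--     if 'Request denied' in s or 'Denied by Policy Module' in s:
--         return 'Rejected'
--     if 'Error' in s or '0x' in s:
--         return 'Errored'
--     return None
--
--
-- def parse_certreq_output(output):
--     stripped = [line.strip() for line in output.splitlines()]
--
--     error_text = '\n'.join(s for s in stripped if 'RequestId:' not in s).strip()
--
--     request_id = next(
--         (rid
--          for s in stripped if 'RequestId:' in s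
--          for rid in [s.split('RequestId:')[1].strip().strip('"')] if rid),
--         '')
--
--     status = 'Unknown'
--     for s in reversed(stripped):
--         if 'RequestId:' in s:
--             continue
--         c = _categorize(s)
--         if c is not None:
--             status = c
--             break
--
--     return status, request_id, error_text
-- ===== Notes on version B (the rewrite author's own statement) =====
-- stated objective: alternative
-- what changed: A's single loop accumulating (status, request_id, lines) is replaced by three independent passes over the stripped lines: a filter+join comprehension for the error text, the first non-empty extraction for the request id, and a reversed-order scan with a categorize helper (first categorized non-RequestId line from the end) for the status.
import Mathlib
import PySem

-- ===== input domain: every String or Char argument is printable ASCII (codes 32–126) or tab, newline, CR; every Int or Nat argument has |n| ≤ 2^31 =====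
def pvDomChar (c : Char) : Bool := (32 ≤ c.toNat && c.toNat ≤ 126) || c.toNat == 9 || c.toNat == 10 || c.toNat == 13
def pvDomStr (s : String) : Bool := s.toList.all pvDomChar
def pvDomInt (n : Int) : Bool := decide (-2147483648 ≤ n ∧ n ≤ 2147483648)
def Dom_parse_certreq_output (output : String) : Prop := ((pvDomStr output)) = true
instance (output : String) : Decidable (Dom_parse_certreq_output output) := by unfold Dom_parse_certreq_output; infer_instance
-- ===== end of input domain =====

-- B replaces A's single accumulating loop by three independent passes over the stripped
-- lines (filter+join for the error text, first non-empty extraction for the request id,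
-- a reversed scan for the status); objective: alternative decomposition, same cost.

-- ===== PORT A =====
-- one fold over the lines carrying (status, request_id, collected lines), as A's loop does
def parse_certreq_output (output : String) : String × String × String :=
  let res := (PySem.Str.splitlines output).foldl
    (fun (st : String × String × List String) line =>
      let status := st.1
      let request_id := st.2.1
      let lines := st.2.2
      let s := PySem.Str.strip line
      if PySem.Str.isIn "RequestId:" s then
        if request_id == "" then
          (status,
           PySem.Str.stripChars (PySem.Str.strip (((PySem.Str.split? s "RequestId:").getD []).getD 1 "")) "\"",
           lines)
        else st
      else if PySem.Str.isIn "Certificate retrieved" s || PySem.Str.isIn "Certificate Issued" s || PySem.Str.isIn "Valid" s then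
        ("Ready", request_id, lines ++ [s])
      else if PySem.Str.isIn "Certificate request is pending" s || PySem.Str.isIn "The request was submitted to the certification authority" s then
        ("Pending", request_id, lines ++ [s])
      else if PySem.Str.isIn "Request denied" s || PySem.Str.isIn "Denied by Policy Module" s then
        ("Rejected", request_id, lines ++ [s])
      else if PySem.Str.isIn "Error" s || PySem.Str.isIn "0x" s then
        ("Errored", request_id, lines ++ [s])
      else
        (status, request_id, lines ++ [s]))
    ("Unknown", "", [])
  (res.1, res.2.1, PySem.Str.strip (PySem.Str.join "\n" res.2.2))

-- ===== PORT B =====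
def pvCategorize (s : String) : Option String :=
  if PySem.Str.isIn "Certificate retrieved" s || PySem.Str.isIn "Certificate Issued" s || PySem.Str.isIn "Valid" s then
    some "Ready"
  else if PySem.Str.isIn "Certificate request is pending" s || PySem.Str.isIn "The request was submitted to the certification authority" s then
    some "Pending"
  else if PySem.Str.isIn "Request denied" s || PySem.Str.isIn "Denied by Policy Module" s then
    some "Rejected"
  else if PySem.Str.isIn "Error" s || PySem.Str.isIn "0x" s then
    some "Errored"
  else
    none

-- rid extraction:  s.split('RequestId:')[1].strip().strip('"')
def pvExtractId (s : String) : String :=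
  PySem.Str.stripChars (PySem.Str.strip (((PySem.Str.split? s "RequestId:").getD []).getD 1 "")) "\""

-- 'for s in reversed(stripped): … break' — first categorized non-RequestId line of the reversed list
def pvStatusRev : List String → String
  | [] => "Unknown"
  | s :: rest =>
    if PySem.Str.isIn "RequestId:" s then pvStatusRev rest
    else match pvCategorize s with
      | some c => c
      | none => pvStatusRev rest

def parse_certreq_output_alt (output : String) : String × String × String :=
  let stripped := (PySem.Str.splitlines output).map PySem.Str.strip
  let error_text :=
    PySem.Str.strip (PySem.Str.join "\n" (stripped.filter (fun s => !(PySem.Str.isIn "RequestId:" s))))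
  let request_id :=
    ((((stripped.filter (fun s => PySem.Str.isIn "RequestId:" s)).map pvExtractId).filter
        (fun r => r != "")).headD "")
  let status := pvStatusRev stripped.reverse
  (status, request_id, error_text)

-- ===== PRECONDITION & SPEC =====
def Spec_parse_certreq_output (output : String) (out : String × String × String) : Prop := out = parse_certreq_output_alt output
instance (output : String) (out : String × String × String) : Decidable (Spec_parse_certreq_output output out) := by unfold Spec_parse_certreq_output; infer_instance

-- ===== CLAIM (what is proved, stated in full; the proofs are below) =====
def Claim_equal_parse_certreq_output : Prop := ∀ (output : String), Dom_parse_certreq_output output → Spec_parse_certreq_output output (parse_certreq_output output)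

-- ===== LEMMAS AND PROOFS =====

-- A's raw per-line loop body, as a function of the already-stripped line
def pvStepA (st : String × String × List String) (s : String) : String × String × List String :=
  if PySem.Str.isIn "RequestId:" s then
    if st.2.1 == "" then (st.1, pvExtractId s, st.2.2) else st
  else if PySem.Str.isIn "Certificate retrieved" s || PySem.Str.isIn "Certificate Issued" s || PySem.Str.isIn "Valid" s then
    ("Ready", st.2.1, st.2.2 ++ [s])
  else if PySem.Str.isIn "Certificate request is pending" s || PySem.Str.isIn "The request was submitted to the certification authority" s then
    ("Pending", st.2.1, st.2.2 ++ [s])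
  else if PySem.Str.isIn "Request denied" s || PySem.Str.isIn "Denied by Policy Module" s then
    ("Rejected", st.2.1, st.2.2 ++ [s])
  else if PySem.Str.isIn "Error" s || PySem.Str.isIn "0x" s then
    ("Errored", st.2.1, st.2.2 ++ [s])
  else
    (st.1, st.2.1, st.2.2 ++ [s])

-- forward status update (A's status component)
def pvStepS (status : String) (s : String) : String :=
  if PySem.Str.isIn "RequestId:" s then status
  else match pvCategorize s with
    | some c => c
    | none => status

-- forward request-id update (A's request_id component)
def pvStepR (rid : String) (s : String) : String :=
  if PySem.Str.isIn "RequestId:" s then (if rid == "" then pvExtractId s else rid) else rid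

def pvFirstId (xs : List String) : String :=
  (((xs.filter (fun s => PySem.Str.isIn "RequestId:" s)).map pvExtractId).filter (fun r => r != "")).headD ""

lemma pvStepA_eq (st : String × String × List String) (s : String) :
    pvStepA st s =
      (pvStepS st.1 s, pvStepR st.2.1 s,
       st.2.2 ++ (if PySem.Str.isIn "RequestId:" s then [] else [s])) := by
  unfold pvStepA pvStepS pvStepR pvCategorize
  split_ifs <;> simp_all

lemma pvFirstId_cons_in (s : String) (xs : List String)
    (h : PySem.Str.isIn "RequestId:" s = true) :
    pvFirstId (s :: xs) = if pvExtractId s == "" then pvFirstId xs else pvExtractId s := by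
  unfold pvFirstId
  simp only [List.filter_cons, h, if_pos, List.map_cons, List.filter_cons]
  cases h2 : pvExtractId s == "" <;> simp_all

lemma pvFirstId_cons_out (s : String) (xs : List String)
    (h : PySem.Str.isIn "RequestId:" s = false) :
    pvFirstId (s :: xs) = pvFirstId xs := by
  unfold pvFirstId
  simp only [List.filter_cons, h, Bool.false_eq_true, if_false]

lemma pvFoldR_eq (xs : List String) (rid : String) :
    xs.foldl pvStepR rid = (if rid == "" then pvFirstId xs else rid) := by
  induction xs generalizing rid with
  | nil => unfold pvFirstId; cases h : rid == "" <;> simp_all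
  | cons s xs ih =>
    simp only [List.foldl_cons, ih]
    cases hin : PySem.Str.isIn "RequestId:" s with
    | true =>
      rw [pvFirstId_cons_in s xs hin]
      cases h : rid == ""
      · have : pvStepR rid s = rid := by unfold pvStepR; simp [PySem.Str.isIn] at hin; simp [hin, h]
        simp [this, h]
      · have hr : rid = "" := by simpa using h
        subst hr
        have : pvStepR "" s = pvExtractId s := by unfold pvStepR; simp [PySem.Str.isIn] at hin; simp [hin]
        rw [this]
        cases h2 : pvExtractId s == "" <;> simp_all
    | false =>
      have : pvStepR rid s = rid := by unfold pvStepR; simp [PySem.Str.isIn] at hin; simp [hin]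
      rw [this, pvFirstId_cons_out s xs hin]

-- proof-side generalization of pvStatusRev with an explicit default
def pvStatusRevD : List String → String → String
  | [], d => d
  | s :: rest, d =>
    if PySem.Str.isIn "RequestId:" s then pvStatusRevD rest d
    else match pvCategorize s with
      | some c => c
      | none => pvStatusRevD rest d

lemma pvStatusRev_eq_D (xs : List String) : pvStatusRev xs = pvStatusRevD xs "Unknown" := by
  induction xs with
  | nil => rfl
  | cons s rest ih => simp only [pvStatusRev, pvStatusRevD, ih]

lemma pvStatusRevD_append (l : List String) (s : String) (d : String) :
    pvStatusRevD (l ++ [s]) d = pvStatusRevD l (pvStepS d s) := by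
  induction l generalizing d with
  | nil => rfl
  | cons t l ih => simp only [List.cons_append, pvStatusRevD, ih]

lemma pvFoldS_eq (xs : List String) (d : String) :
    pvStatusRevD xs.reverse d = xs.foldl pvStepS d := by
  induction xs generalizing d with
  | nil => rfl
  | cons s t ih =>
    simp only [List.reverse_cons, pvStatusRevD_append, List.foldl_cons, ih]

lemma pvFoldA (xs : List String) (st : String × String × List String) :
    xs.foldl pvStepA st =
      (xs.foldl pvStepS st.1, xs.foldl pvStepR st.2.1,
       st.2.2 ++ xs.filter (fun s => !(PySem.Str.isIn "RequestId:" s))) := by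
  induction xs generalizing st with
  | nil => simp
  | cons s t ih =>
    simp only [List.foldl_cons, ih, pvStepA_eq, List.filter_cons]
    cases h : PySem.Str.isIn "RequestId:" s
    · simp [PySem.Str.isIn] at h; simp [h]
    · simp [PySem.Str.isIn] at h; simp [h]

-- ===== VERDICT (by name: the statement is the Claim_ definition above) =====
theorem parse_certreq_output_spec : Claim_equal_parse_certreq_output := by
  intro output _
  unfold Spec_parse_certreq_output
  have hA : parse_certreq_output output =
      (let res := (PySem.Str.splitlines output).foldl
          (fun st line => pvStepA st (PySem.Str.strip line)) ("Unknown", "", ([] : List String));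
       (res.1, res.2.1, PySem.Str.strip (PySem.Str.join "\n" res.2.2))) := rfl
  rw [show (PySem.Str.splitlines output).foldl
        (fun st line => pvStepA st (PySem.Str.strip line)) ("Unknown", "", ([] : List String)) =
      ((PySem.Str.splitlines output).map PySem.Str.strip).foldl pvStepA
        ("Unknown", "", ([] : List String)) from (List.foldl_map).symm] at hA
  rw [pvFoldA] at hA
  rw [hA]
  unfold parse_certreq_output_alt
  simp only [List.nil_append]
  refine Prod.ext ?_ (Prod.ext ?_ rfl)
  · show ((PySem.Str.splitlines output).map PySem.Str.strip).foldl pvStepS "Unknown" = _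
    rw [← pvFoldS_eq, ← pvStatusRev_eq_D]
  · show ((PySem.Str.splitlines output).map PySem.Str.strip).foldl pvStepR "" = _
    rw [pvFoldR_eq]
    simp [pvFirstId]
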